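-- pv_equiv track=rewrite | github.com/Dr-Infernal/Thoth | designer/export.py | _split_css_top_level
-- ===== SOURCE A (Python) =====
-- def _split_css_top_level(text: str, sep: str = ",") -> list[str]:
--     """Split ``text`` on ``sep`` while ignoring separators inside parens."""
--     parts: list[str] = []
--     depth = 0
--     buf: list[str] = []
--     for ch in text:
--         if ch == "(":
--             depth += 1
--             buf.append(ch)
--         elif ch == ")":
--             depth = max(0, depth - 1)
--             buf.append(ch)
--         elif ch == sep and depth == 0:
--             parts.append("".join(buf).strip())
--             buf = []
--         else:
--             buf.append(ch)
--     if buf: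
--         parts.append("".join(buf).strip())
--     return parts
-- ===== SOURCE B (Python) =====
-- def _split_css_top_level(text: str, sep: str = ",") -> list[str]:
--     """Split ``text`` on ``sep`` while ignoring separators inside parens."""
--     cuts = []
--     depth = 0
--     for i, ch in enumerate(text):
--         if ch == "(":
--             depth += 1
--         elif ch == ")":
--             depth = max(0, depth - 1)
--         elif ch == sep and depth == 0:
--             cuts.append(i)
--     parts = []
--     prev = 0
--     for i in cuts:
--         parts.append(text[prev:i].strip())
--         prev = i + 1
--     if prev < len(text):
--         parts.append(text[prev:].strip())
--     return parts
-- ===== Notes on version B (the rewrite author's own statement) =====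
-- stated objective: alternative
-- what changed: Replaces the incremental character-buffer accumulation with a two-pass scheme: first collect the indices of top-level separators, then cut the original string by slicing between consecutive cut points, never building a per-segment buffer.
import Mathlib
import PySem

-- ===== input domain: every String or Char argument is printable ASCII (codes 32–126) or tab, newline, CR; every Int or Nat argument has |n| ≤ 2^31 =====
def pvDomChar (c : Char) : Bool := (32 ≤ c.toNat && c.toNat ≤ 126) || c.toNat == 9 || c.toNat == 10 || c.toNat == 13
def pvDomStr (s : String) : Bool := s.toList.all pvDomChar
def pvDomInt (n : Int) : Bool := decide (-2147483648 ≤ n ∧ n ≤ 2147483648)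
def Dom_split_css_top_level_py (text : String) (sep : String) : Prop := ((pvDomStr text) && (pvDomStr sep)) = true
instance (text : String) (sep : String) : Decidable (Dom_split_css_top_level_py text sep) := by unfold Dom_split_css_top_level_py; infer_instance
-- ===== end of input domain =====

-- B replaces A's character-buffer accumulation by two passes (collect top-level
-- separator indices, then slice the string between them): alternative decomposition.

-- ===== PORT A =====
-- state: (parts, depth, buf); one step of A's for-loop body
def pvStepA (sep : String) (st : List String × Int × List Char) (ch : Char) :
    List String × Int × List Char :=
  if ch = '(' then (st.1, st.2.1 + 1, st.2.2 ++ [ch])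
  else if ch = ')' then (st.1, max 0 (st.2.1 - 1), st.2.2 ++ [ch])
  else if String.ofList [ch] = sep ∧ st.2.1 = 0 then
    (st.1 ++ [String.ofList (PySem.Chars.strip st.2.2)], st.2.1, [])
  else (st.1, st.2.1, st.2.2 ++ [ch])

def split_css_top_level_py (text : String) (sep : String) : List String :=
  let r := text.toList.foldl (pvStepA sep) ([], 0, [])
  if r.2.2 ≠ [] then r.1 ++ [String.ofList (PySem.Chars.strip r.2.2)] else r.1

-- ===== PORT B =====
-- first pass: state (depth, cuts); records the index of each top-level separator
def pvCutStepB (sep : String) (st : Int × List Int) (p : Int × Char) : Int × List Int :=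
  if p.2 = '(' then (st.1 + 1, st.2)
  else if p.2 = ')' then (max 0 (st.1 - 1), st.2)
  else if String.ofList [p.2] = sep ∧ st.1 = 0 then (st.1, st.2 ++ [p.1])
  else (st.1, st.2)

-- second pass: state (prev, parts); appends text[prev:i].strip() per cut i
def pvPayStepB (cs : List Char) (st : Int × List String) (i : Int) : Int × List String :=
  (i + 1, st.2 ++ [String.ofList (PySem.Chars.strip (PySem.List.slice cs (some st.1) (some i)))])

def split_css_top_level_py_alt (text : String) (sep : String) : List String :=
  let cs := text.toList
  let cuts := ((PySem.List.enumerate cs 0).foldl (pvCutStepB sep) (0, [])).2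
  let fin := cuts.foldl (pvPayStepB cs) (0, [])
  if fin.1 < (cs.length : Int) then
    fin.2 ++ [String.ofList (PySem.Chars.strip (PySem.List.slice cs (some fin.1) none))]
  else fin.2

-- ===== PRECONDITION & SPEC =====
def Spec_split_css_top_level_py (text : String) (sep : String) (out : List String) : Prop := out = split_css_top_level_py_alt text sep
instance (text : String) (sep : String) (out : List String) : Decidable (Spec_split_css_top_level_py text sep out) := by unfold Spec_split_css_top_level_py; infer_instance

-- ===== CLAIM (what is proved, stated in full; the proofs are below) =====
def Claim_equal_split_css_top_level_py : Prop := ∀ (text : String) (sep : String), Dom_split_css_top_level_py text sep → Spec_split_css_top_level_py text sep (split_css_top_level_py text sep)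

-- ===== LEMMAS AND PROOFS =====

-- A's rule after the loop
def pvFinishA (r : List String × Int × List Char) : List String :=
  if r.2.2 ≠ [] then r.1 ++ [String.ofList (PySem.Chars.strip r.2.2)] else r.1

-- B's rule after the second pass
def pvFinishB (cs : List Char) (fin : Int × List String) : List String :=
  if fin.1 < (cs.length : Int) then
    fin.2 ++ [String.ofList (PySem.Chars.strip (PySem.List.slice cs (some fin.1) none))]
  else fin.2

-- evaluation lemmas that keep the step functions folded
theorem pvStepA_open (sep : String) (parts : List String) (depth : Int) (buf : List Char) :
    pvStepA sep (parts, depth, buf) '(' = (parts, depth + 1, buf ++ ['(']) := by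
  unfold pvStepA; rw [if_pos rfl]

theorem pvStepA_close (sep : String) (parts : List String) (depth : Int) (buf : List Char) :
    pvStepA sep (parts, depth, buf) ')' = (parts, max 0 (depth - 1), buf ++ [')']) := by
  unfold pvStepA; rw [if_neg (by decide), if_pos rfl]

theorem pvStepA_cut (sep : String) (parts : List String) (depth : Int) (buf : List Char)
    (ch : Char) (h1 : ¬ ch = '(') (h2 : ¬ ch = ')')
    (h3 : String.ofList [ch] = sep ∧ depth = 0) :
    pvStepA sep (parts, depth, buf) ch
      = (parts ++ [String.ofList (PySem.Chars.strip buf)], depth, []) := by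
  unfold pvStepA; rw [if_neg h1, if_neg h2, if_pos h3]

theorem pvStepA_other (sep : String) (parts : List String) (depth : Int) (buf : List Char)
    (ch : Char) (h1 : ¬ ch = '(') (h2 : ¬ ch = ')')
    (h3 : ¬ (String.ofList [ch] = sep ∧ depth = 0)) :
    pvStepA sep (parts, depth, buf) ch = (parts, depth, buf ++ [ch]) := by
  unfold pvStepA; rw [if_neg h1, if_neg h2, if_neg h3]

theorem pvCutStepB_open (sep : String) (depth : Int) (cuts : List Int) (i : Int) :
    pvCutStepB sep (depth, cuts) (i, '(') = (depth + 1, cuts) := by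
  unfold pvCutStepB; rw [if_pos rfl]

theorem pvCutStepB_close (sep : String) (depth : Int) (cuts : List Int) (i : Int) :
    pvCutStepB sep (depth, cuts) (i, ')') = (max 0 (depth - 1), cuts) := by
  unfold pvCutStepB; simp

theorem pvCutStepB_cut (sep : String) (depth : Int) (cuts : List Int) (i : Int)
    (ch : Char) (h1 : ¬ ch = '(') (h2 : ¬ ch = ')')
    (h3 : String.ofList [ch] = sep ∧ depth = 0) :
    pvCutStepB sep (depth, cuts) (i, ch) = (depth, cuts ++ [i]) := by
  unfold pvCutStepB; rw [if_neg h1, if_neg h2, if_pos h3]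

theorem pvCutStepB_other (sep : String) (depth : Int) (cuts : List Int) (i : Int)
    (ch : Char) (h1 : ¬ ch = '(') (h2 : ¬ ch = ')')
    (h3 : ¬ (String.ofList [ch] = sep ∧ depth = 0)) :
    pvCutStepB sep (depth, cuts) (i, ch) = (depth, cuts) := by
  unfold pvCutStepB; rw [if_neg h1, if_neg h2, if_neg h3]

theorem pvPayStepB_app (cs : List Char) (p : Int) (parts : List String) (i : Int) :
    pvPayStepB cs (p, parts) i
      = (i + 1, parts ++ [String.ofList (PySem.Chars.strip (PySem.List.slice cs (some p) (some i)))]) := rfl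

-- cuts accumulate on the right; depth is independent of the accumulated cut list
theorem pvCuts_acc (sep : String) (l : List (Int × Char)) :
    ∀ (d : Int) (acc : List Int),
    l.foldl (pvCutStepB sep) (d, acc)
      = ((l.foldl (pvCutStepB sep) (d, [])).1, acc ++ (l.foldl (pvCutStepB sep) (d, [])).2) := by
  induction l with
  | nil => intro d acc; simp
  | cons p l ih =>
      intro d acc
      obtain ⟨i, ch⟩ := p
      rw [List.foldl_cons, List.foldl_cons]
      by_cases h1 : ch = '('
      · subst h1; rw [pvCutStepB_open, pvCutStepB_open, ih (d + 1) acc]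
      · by_cases h2 : ch = ')'
        · subst h2; rw [pvCutStepB_close, pvCutStepB_close, ih (max 0 (d - 1)) acc]
        · by_cases h3 : String.ofList [ch] = sep ∧ d = 0
          · rw [pvCutStepB_cut sep d acc i ch h1 h2 h3, pvCutStepB_cut sep d [] i ch h1 h2 h3,
                ih d (acc ++ [i]), ih d ([] ++ [i])]
            simp
          · rw [pvCutStepB_other sep d acc i ch h1 h2 h3, pvCutStepB_other sep d [] i ch h1 h2 h3,
                ih d acc]

-- the main invariant: processing the suffix l = cs.drop pos, with A's buffer equal
-- to cs[prev:pos], the two finishing rules produce the same list of parts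
theorem pvKey (sep : String) (cs : List Char) (l : List Char) :
    ∀ (pos prev : Nat) (parts : List String) (depth : Int),
    pos ≤ cs.length → prev ≤ pos → cs.drop pos = l →
    pvFinishA (l.foldl (pvStepA sep) (parts, depth, (cs.drop prev).take (pos - prev)))
    = pvFinishB cs
        ((((PySem.List.enumerate l (pos : Int)).foldl (pvCutStepB sep) (depth, [])).2).foldl
          (pvPayStepB cs) (((prev : Nat) : Int), parts)) := by
  induction l with
  | nil =>
      intro pos prev parts depth hpos hprev hdrop
      have hlen : pos = cs.length := by
        have := List.drop_eq_nil_iff.mp hdrop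
        omega
      subst hlen
      simp only [PySem.List.enumerate_nil, List.foldl_nil]
      have hbuf : (cs.drop prev).take (cs.length - prev) = cs.drop prev := by
        apply List.take_of_length_le; simp
      rw [hbuf]
      unfold pvFinishA pvFinishB
      rw [PySem.List.slice_from_natCast]
      by_cases h : prev < cs.length
      · have ha : cs.drop prev ≠ [] := by
          simp [List.drop_eq_nil_iff]; omega
        have hb : ((prev : Nat) : Int) < (cs.length : Int) := by exact_mod_cast h
        simp [ha, hb]
      · have ha : cs.drop prev = [] := by
          apply List.drop_eq_nil_of_le; omega
        have hb : ¬ (((prev : Nat) : Int) < (cs.length : Int)) := by exact_mod_cast h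
        simp [ha, hb]
  | cons ch l ih =>
      intro pos prev parts depth hpos hprev hdrop
      have hposlt : pos < cs.length := by
        by_contra h
        have : cs.drop pos = [] := List.drop_eq_nil_of_le (by omega)
        rw [this] at hdrop; exact List.cons_ne_nil _ _ hdrop.symm
      have hget : cs[pos]? = some ch := by
        have h0 : (cs.drop pos)[0]? = some ch := by rw [hdrop]; rfl
        rw [List.getElem?_drop] at h0; simpa using h0
      have hdrop' : cs.drop (pos + 1) = l := by
        have h := congrArg List.tail hdrop
        rw [List.tail_drop] at h; simpa using h
      have hbufext : (cs.drop prev).take (pos - prev) ++ [ch]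
          = (cs.drop prev).take (pos + 1 - prev) := by
        have h1 : pos + 1 - prev = (pos - prev) + 1 := by omega
        rw [h1, List.take_add_one]
        have h2 : (cs.drop prev)[pos - prev]? = some ch := by
          rw [List.getElem?_drop]
          have h3 : prev + (pos - prev) = pos := by omega
          rw [h3]; exact hget
        simp [h2]
      rw [List.foldl_cons, PySem.List.enumerate_cons, List.foldl_cons]
      by_cases h1 : ch = '('
      · subst h1
        rw [pvStepA_open, pvCutStepB_open, hbufext]
        have := ih (pos + 1) prev parts (depth + 1) (by omega) (by omega) hdrop'
        push_cast at this ⊢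
        exact this
      · by_cases h2 : ch = ')'
        · subst h2
          rw [pvStepA_close, pvCutStepB_close, hbufext]
          have := ih (pos + 1) prev parts (max 0 (depth - 1)) (by omega) (by omega) hdrop'
          push_cast at this ⊢
          exact this
        · by_cases h3 : String.ofList [ch] = sep ∧ depth = 0
          · rw [pvStepA_cut sep parts depth _ ch h1 h2 h3,
                pvCutStepB_cut sep depth [] ((pos : Nat) : Int) ch h1 h2 h3,
                pvCuts_acc]
            simp only [List.nil_append, List.cons_append, List.foldl_cons]
            rw [pvPayStepB_app, PySem.List.slice_natCast]
            have := ih (pos + 1) (pos + 1)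
              (parts ++ [String.ofList (PySem.Chars.strip ((cs.drop prev).take (pos - prev)))])
              depth (by omega) (by omega) hdrop'
            simp only [Nat.sub_self, List.take_zero] at this
            push_cast at this ⊢
            exact this
          · rw [pvStepA_other sep parts depth _ ch h1 h2 h3,
                pvCutStepB_other sep depth [] ((pos : Nat) : Int) ch h1 h2 h3, hbufext]
            have := ih (pos + 1) prev parts depth (by omega) (by omega) hdrop'
            push_cast at this ⊢
            exact this

-- ===== VERDICT (by name: the statement is the Claim_ definition above) =====
theorem split_css_top_level_py_spec : Claim_equal_split_css_top_level_py := by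
  intro text sep _
  unfold Spec_split_css_top_level_py split_css_top_level_py split_css_top_level_py_alt
  have := pvKey sep text.toList text.toList 0 0 [] 0 (by omega) (by omega) (by simp)
  simpa [pvFinishA, pvFinishB] using this
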